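-- pv_equiv track=rewrite | github.com/Fill84/EntroPhone | src/integrations/notes_agent.py | _extract_content
-- ===== SOURCE A (Python) =====
-- def _extract_content(text: str) -> str:
--     """Extract the note content from the command text."""
--     prefixes = [
--         "onthoud dat", "onthoud", "remember that", "remember",
--         "noteer", "note", "schrijf op", "write down",
--         "voeg toe", "add", "noteren",
--     ]
--     text_lower = text.lower()
--     for prefix in sorted(prefixes, key=len, reverse=True):
--         if text_lower.startswith(prefix):
--             return text[len(prefix):].strip().strip(".:,")
--     return text.strip()
-- ===== SOURCE B (Python) =====
-- def _extract_content(text: str) -> str: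
--     """Extract the note content from the command text."""
--     prefixes = [
--         "onthoud dat", "onthoud", "remember that", "remember",
--         "noteer", "note", "schrijf op", "write down",
--         "voeg toe", "add", "noteren",
--     ]
--     text_lower = text.lower()
--     best = None
--     for prefix in prefixes:
--         if text_lower.startswith(prefix) and (best is None or len(prefix) > len(best)):
--             best = prefix
--     if best is None:
--         return text.strip()
--     return text[len(best):].strip().strip(".:,")
-- ===== Notes on version B (the rewrite author's own statement) =====
-- stated objective: alternative
-- what changed: Instead of sorting the prefixes by length descending and returning at the first match, B makes one unsorted pass that keeps the longest matching prefix in an accumulator and strips it afterwards.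
import Mathlib
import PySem

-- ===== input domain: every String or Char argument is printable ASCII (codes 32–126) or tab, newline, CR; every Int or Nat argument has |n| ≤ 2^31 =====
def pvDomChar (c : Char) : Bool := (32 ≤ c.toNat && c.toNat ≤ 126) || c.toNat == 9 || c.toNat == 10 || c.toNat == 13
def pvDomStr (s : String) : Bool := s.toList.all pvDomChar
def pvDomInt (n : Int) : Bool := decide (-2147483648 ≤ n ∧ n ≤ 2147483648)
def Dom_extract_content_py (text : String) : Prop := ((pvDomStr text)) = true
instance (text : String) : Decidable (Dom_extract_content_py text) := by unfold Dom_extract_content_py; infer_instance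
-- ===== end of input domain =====

-- B replaces A's "sort prefixes by length descending, return first match" with one unsorted
-- pass tracking the longest matching prefix; same result, no sort (alternative decomposition).


-- ===== PORT A =====
def pvPrefixesA : List String :=
  ["onthoud dat", "onthoud", "remember that", "remember",
   "noteer", "note", "schrijf op", "write down",
   "voeg toe", "add", "noteren"]

-- the for-loop of A: first prefix (in the given, sorted order) that text_lower starts with wins
def extract_content_loopA (text text_lower : String) : List String → String
  | [] => PySem.Str.strip text
  | p :: rest =>
    if PySem.Str.startswith text_lower p then
      PySem.Str.stripChars
        (PySem.Str.strip (PySem.Str.slice text (some (PySem.Str.len p)) none)) ".:,"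
    else extract_content_loopA text text_lower rest

def extract_content_py (text : String) : String :=
  extract_content_loopA text (PySem.Str.lower text)
    (PySem.List.sorted pvPrefixesA (fun p => PySem.Str.len p) true)

-- ===== PORT B =====
def pvPrefixesB : List String :=
  ["onthoud dat", "onthoud", "remember that", "remember",
   "noteer", "note", "schrijf op", "write down",
   "voeg toe", "add", "noteren"]

-- the for-loop of B: keep, over the unsorted list, the longest prefix text_lower starts with
def extract_content_loopB (text_lower : String) (best : Option String) : List String → Option String
  | [] => best
  | p :: rest =>
    if PySem.Str.startswith text_lower p &&
        (match best with
         | none => true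
         | some b => decide (PySem.Str.len b < PySem.Str.len p)) then
      extract_content_loopB text_lower (some p) rest
    else
      extract_content_loopB text_lower best rest

def extract_content_py_alt (text : String) : String :=
  match extract_content_loopB (PySem.Str.lower text) none pvPrefixesB with
  | none => PySem.Str.strip text
  | some best =>
      PySem.Str.stripChars
        (PySem.Str.strip (PySem.Str.slice text (some (PySem.Str.len best)) none)) ".:,"

-- ===== PRECONDITION & SPEC =====
def Spec_extract_content_py (text : String) (out : String) : Prop := out = extract_content_py_alt text
instance (text : String) (out : String) : Decidable (Spec_extract_content_py text out) := by unfold Spec_extract_content_py; infer_instance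

-- ===== CLAIM (what is proved, stated in full; the proofs are below) =====
def Claim_equal_extract_content_py : Prop := ∀ (text : String), Dom_extract_content_py text → Spec_extract_content_py text (extract_content_py text)

-- ===== LEMMAS AND PROOFS =====

theorem sortedA_eval :
    PySem.List.sorted pvPrefixesA (fun p => PySem.Str.len p) true =
    ["remember that", "onthoud dat", "schrijf op", "write down",
     "remember", "voeg toe", "onthoud", "noteren", "noteer", "note", "add"] := by decide

-- B's loop is a left fold: it splits over ++
theorem loopB_append (tl : String) (best : Option String) (l1 l2 : List String) :
    extract_content_loopB tl best (l1 ++ l2) =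
    extract_content_loopB tl (extract_content_loopB tl best l1) l2 := by
  induction l1 generalizing best with
  | nil => rfl
  | cons p rest ih =>
    rcases best with _ | b <;>
      simp only [List.cons_append, extract_content_loopB] <;>
      split <;> exact ih _

-- invariant: if every processed prefix is non-matching or shorter than n, the best stays shorter than n
theorem loopB_bound (tl : String) (n : Int) :
    ∀ (l : List String) (best : Option String),
    (∀ b, best = some b → PySem.Str.len b < n) →
    (∀ q ∈ l, PySem.Str.startswith tl q = false ∨ PySem.Str.len q < n) →
    ∀ b, extract_content_loopB tl best l = some b → PySem.Str.len b < n := by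
  intro l
  induction l with
  | nil => intro best hb _ b h; exact hb b h
  | cons p rest ih =>
    intro best hb hl b h
    rcases best with _ | b0 <;>
      simp only [extract_content_loopB] at h <;>
      split at h
    · rename_i hc
      refine ih (some p) ?_ (fun q hq => hl q (List.mem_cons_of_mem _ hq)) b h
      intro x hx; cases hx
      rcases hl p List.mem_cons_self with hf | hlt
      · rw [hf] at hc; simp at hc
      · exact hlt
    · exact ih none (by intro x hx; cases hx) (fun q hq => hl q (List.mem_cons_of_mem _ hq)) b h
    · rename_i hc
      refine ih (some p) ?_ (fun q hq => hl q (List.mem_cons_of_mem _ hq)) b h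
      intro x hx; cases hx
      rcases hl p List.mem_cons_self with hf | hlt
      · rw [hf] at hc; simp at hc
      · exact hlt
    · exact ih (some b0) hb (fun q hq => hl q (List.mem_cons_of_mem _ hq)) b h

-- once the best is at least as long as everything that still matches, it is kept
theorem loopB_keep (tl : String) (b : String) :
    ∀ l : List String,
    (∀ q ∈ l, PySem.Str.startswith tl q = false ∨ PySem.Str.len q ≤ PySem.Str.len b) →
    extract_content_loopB tl (some b) l = some b := by
  intro l
  induction l with
  | nil => intro _; rfl
  | cons p rest ih =>
    intro h
    have hcond : (PySem.Str.startswith tl p &&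
        decide (PySem.Str.len b < PySem.Str.len p)) = false := by
      rcases h p List.mem_cons_self with hf | hle
      · rw [hf]; rfl
      · simp only [Bool.and_eq_false_iff, decide_eq_false_iff_not, not_lt]
        exact Or.inr hle
    simp only [extract_content_loopB, hcond, Bool.false_eq_true, if_false]
    exact ih (fun q hq => h q (List.mem_cons_of_mem _ hq))

-- if nothing matches, the best stays none
theorem loopB_none (tl : String) :
    ∀ l : List String, (∀ q ∈ l, PySem.Str.startswith tl q = false) →
    extract_content_loopB tl none l = none := by
  intro l
  induction l with
  | nil => intro _; rfl
  | cons p rest ih =>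
    intro h
    have hf := h p List.mem_cons_self
    simp only [extract_content_loopB, hf, Bool.false_and, Bool.false_eq_true, if_false]
    exact ih (fun q hq => h q (List.mem_cons_of_mem _ hq))

-- the main characterisation: the strictly longest matching prefix wins B's pass
theorem loopB_pick (tl : String) (l1 l2 : List String) (p : String)
    (h1 : ∀ q ∈ l1, PySem.Str.startswith tl q = false ∨ PySem.Str.len q < PySem.Str.len p)
    (hp : PySem.Str.startswith tl p = true)
    (h2 : ∀ q ∈ l2, PySem.Str.startswith tl q = false ∨ PySem.Str.len q ≤ PySem.Str.len p) :
    extract_content_loopB tl none (l1 ++ p :: l2) = some p := by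
  rw [loopB_append]
  have hb := loopB_bound tl (PySem.Str.len p) l1 none (by intro b h; cases h) h1
  rcases hs : extract_content_loopB tl none l1 with _ | b
  · simp only [extract_content_loopB, hp, Bool.and_true]
    exact loopB_keep tl p l2 h2
  · have hlt := hb b hs
    have hcond : (PySem.Str.startswith tl p &&
        decide (PySem.Str.len b < PySem.Str.len p)) = true := by
      simp only [hp, Bool.true_and, decide_eq_true_eq]; exact hlt
    simp only [extract_content_loopB, hcond]
    exact loopB_keep tl p l2 h2

-- ===== VERDICT (by name: the statement is the Claim_ definition above) =====
theorem extract_content_py_spec : Claim_equal_extract_content_py := by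
  intro text _
  unfold Spec_extract_content_py extract_content_py extract_content_py_alt
  rw [sortedA_eval]
  set tl := PySem.Str.lower text with htl
  by_cases h1 : PySem.Str.startswith tl "remember that" = true
  · have hB : extract_content_loopB tl none pvPrefixesB = some "remember that" :=
      loopB_pick tl ["onthoud dat", "onthoud"] ["remember", "noteer", "note", "schrijf op", "write down", "voeg toe", "add", "noteren"] "remember that"
        (by simp only [List.forall_mem_cons]; exact ⟨Or.inr (by decide), Or.inr (by decide), List.forall_mem_nil _⟩)
        h1
        (by simp only [List.forall_mem_cons]; exact ⟨Or.inr (by decide), Or.inr (by decide), Or.inr (by decide), Or.inr (by decide), Or.inr (by decide), Or.inr (by decide), Or.inr (by decide), Or.inr (by decide), List.forall_mem_nil _⟩)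
    rw [hB]
    simp only [extract_content_loopA, h1, reduceIte]
  rw [Bool.not_eq_true] at h1
  by_cases h2 : PySem.Str.startswith tl "onthoud dat" = true
  · have hB : extract_content_loopB tl none pvPrefixesB = some "onthoud dat" :=
      loopB_pick tl ([] : List String) ["onthoud", "remember that", "remember", "noteer", "note", "schrijf op", "write down", "voeg toe", "add", "noteren"] "onthoud dat"
        (List.forall_mem_nil _)
        h2
        (by simp only [List.forall_mem_cons]; exact ⟨Or.inr (by decide), Or.inl h1, Or.inr (by decide), Or.inr (by decide), Or.inr (by decide), Or.inr (by decide), Or.inr (by decide), Or.inr (by decide), Or.inr (by decide), Or.inr (by decide), List.forall_mem_nil _⟩)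
    rw [hB]
    simp only [extract_content_loopA, h1, h2, Bool.false_eq_true, reduceIte]
  rw [Bool.not_eq_true] at h2
  by_cases h3 : PySem.Str.startswith tl "schrijf op" = true
  · have hB : extract_content_loopB tl none pvPrefixesB = some "schrijf op" :=
      loopB_pick tl ["onthoud dat", "onthoud", "remember that", "remember", "noteer", "note"] ["write down", "voeg toe", "add", "noteren"] "schrijf op"
        (by simp only [List.forall_mem_cons]; exact ⟨Or.inl h2, Or.inr (by decide), Or.inl h1, Or.inr (by decide), Or.inr (by decide), Or.inr (by decide), List.forall_mem_nil _⟩)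
        h3
        (by simp only [List.forall_mem_cons]; exact ⟨Or.inr (by decide), Or.inr (by decide), Or.inr (by decide), Or.inr (by decide), List.forall_mem_nil _⟩)
    rw [hB]
    simp only [extract_content_loopA, h1, h2, h3, Bool.false_eq_true, reduceIte]
  rw [Bool.not_eq_true] at h3
  by_cases h4 : PySem.Str.startswith tl "write down" = true
  · have hB : extract_content_loopB tl none pvPrefixesB = some "write down" :=
      loopB_pick tl ["onthoud dat", "onthoud", "remember that", "remember", "noteer", "note", "schrijf op"] ["voeg toe", "add", "noteren"] "write down"
        (by simp only [List.forall_mem_cons]; exact ⟨Or.inl h2, Or.inr (by decide), Or.inl h1, Or.inr (by decide), Or.inr (by decide), Or.inr (by decide), Or.inl h3, List.forall_mem_nil _⟩)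
        h4
        (by simp only [List.forall_mem_cons]; exact ⟨Or.inr (by decide), Or.inr (by decide), Or.inr (by decide), List.forall_mem_nil _⟩)
    rw [hB]
    simp only [extract_content_loopA, h1, h2, h3, h4, Bool.false_eq_true, reduceIte]
  rw [Bool.not_eq_true] at h4
  by_cases h5 : PySem.Str.startswith tl "remember" = true
  · have hB : extract_content_loopB tl none pvPrefixesB = some "remember" :=
      loopB_pick tl ["onthoud dat", "onthoud", "remember that"] ["noteer", "note", "schrijf op", "write down", "voeg toe", "add", "noteren"] "remember"
        (by simp only [List.forall_mem_cons]; exact ⟨Or.inl h2, Or.inr (by decide), Or.inl h1, List.forall_mem_nil _⟩)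
        h5
        (by simp only [List.forall_mem_cons]; exact ⟨Or.inr (by decide), Or.inr (by decide), Or.inl h3, Or.inl h4, Or.inr (by decide), Or.inr (by decide), Or.inr (by decide), List.forall_mem_nil _⟩)
    rw [hB]
    simp only [extract_content_loopA, h1, h2, h3, h4, h5, Bool.false_eq_true, reduceIte]
  rw [Bool.not_eq_true] at h5
  by_cases h6 : PySem.Str.startswith tl "voeg toe" = true
  · have hB : extract_content_loopB tl none pvPrefixesB = some "voeg toe" :=
      loopB_pick tl ["onthoud dat", "onthoud", "remember that", "remember", "noteer", "note", "schrijf op", "write down"] ["add", "noteren"] "voeg toe"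
        (by simp only [List.forall_mem_cons]; exact ⟨Or.inl h2, Or.inr (by decide), Or.inl h1, Or.inl h5, Or.inr (by decide), Or.inr (by decide), Or.inl h3, Or.inl h4, List.forall_mem_nil _⟩)
        h6
        (by simp only [List.forall_mem_cons]; exact ⟨Or.inr (by decide), Or.inr (by decide), List.forall_mem_nil _⟩)
    rw [hB]
    simp only [extract_content_loopA, h1, h2, h3, h4, h5, h6, Bool.false_eq_true, reduceIte]
  rw [Bool.not_eq_true] at h6
  by_cases h7 : PySem.Str.startswith tl "onthoud" = true
  · have hB : extract_content_loopB tl none pvPrefixesB = some "onthoud" :=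
      loopB_pick tl ["onthoud dat"] ["remember that", "remember", "noteer", "note", "schrijf op", "write down", "voeg toe", "add", "noteren"] "onthoud"
        (by simp only [List.forall_mem_cons]; exact ⟨Or.inl h2, List.forall_mem_nil _⟩)
        h7
        (by simp only [List.forall_mem_cons]; exact ⟨Or.inl h1, Or.inl h5, Or.inr (by decide), Or.inr (by decide), Or.inl h3, Or.inl h4, Or.inl h6, Or.inr (by decide), Or.inr (by decide), List.forall_mem_nil _⟩)
    rw [hB]
    simp only [extract_content_loopA, h1, h2, h3, h4, h5, h6, h7, Bool.false_eq_true, reduceIte]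
  rw [Bool.not_eq_true] at h7
  by_cases h8 : PySem.Str.startswith tl "noteren" = true
  · have hB : extract_content_loopB tl none pvPrefixesB = some "noteren" :=
      loopB_pick tl ["onthoud dat", "onthoud", "remember that", "remember", "noteer", "note", "schrijf op", "write down", "voeg toe", "add"] ([] : List String) "noteren"
        (by simp only [List.forall_mem_cons]; exact ⟨Or.inl h2, Or.inl h7, Or.inl h1, Or.inl h5, Or.inr (by decide), Or.inr (by decide), Or.inl h3, Or.inl h4, Or.inl h6, Or.inr (by decide), List.forall_mem_nil _⟩)
        h8
        (List.forall_mem_nil _)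
    rw [hB]
    simp only [extract_content_loopA, h1, h2, h3, h4, h5, h6, h7, h8, Bool.false_eq_true, reduceIte]
  rw [Bool.not_eq_true] at h8
  by_cases h9 : PySem.Str.startswith tl "noteer" = true
  · have hB : extract_content_loopB tl none pvPrefixesB = some "noteer" :=
      loopB_pick tl ["onthoud dat", "onthoud", "remember that", "remember"] ["note", "schrijf op", "write down", "voeg toe", "add", "noteren"] "noteer"
        (by simp only [List.forall_mem_cons]; exact ⟨Or.inl h2, Or.inl h7, Or.inl h1, Or.inl h5, List.forall_mem_nil _⟩)
        h9
        (by simp only [List.forall_mem_cons]; exact ⟨Or.inr (by decide), Or.inl h3, Or.inl h4, Or.inl h6, Or.inr (by decide), Or.inl h8, List.forall_mem_nil _⟩)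
    rw [hB]
    simp only [extract_content_loopA, h1, h2, h3, h4, h5, h6, h7, h8, h9, Bool.false_eq_true, reduceIte]
  rw [Bool.not_eq_true] at h9
  by_cases h10 : PySem.Str.startswith tl "note" = true
  · have hB : extract_content_loopB tl none pvPrefixesB = some "note" :=
      loopB_pick tl ["onthoud dat", "onthoud", "remember that", "remember", "noteer"] ["schrijf op", "write down", "voeg toe", "add", "noteren"] "note"
        (by simp only [List.forall_mem_cons]; exact ⟨Or.inl h2, Or.inl h7, Or.inl h1, Or.inl h5, Or.inl h9, List.forall_mem_nil _⟩)
        h10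
        (by simp only [List.forall_mem_cons]; exact ⟨Or.inl h3, Or.inl h4, Or.inl h6, Or.inr (by decide), Or.inl h8, List.forall_mem_nil _⟩)
    rw [hB]
    simp only [extract_content_loopA, h1, h2, h3, h4, h5, h6, h7, h8, h9, h10, Bool.false_eq_true, reduceIte]
  rw [Bool.not_eq_true] at h10
  by_cases h11 : PySem.Str.startswith tl "add" = true
  · have hB : extract_content_loopB tl none pvPrefixesB = some "add" :=
      loopB_pick tl ["onthoud dat", "onthoud", "remember that", "remember", "noteer", "note", "schrijf op", "write down", "voeg toe"] ["noteren"] "add"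
        (by simp only [List.forall_mem_cons]; exact ⟨Or.inl h2, Or.inl h7, Or.inl h1, Or.inl h5, Or.inl h9, Or.inl h10, Or.inl h3, Or.inl h4, Or.inl h6, List.forall_mem_nil _⟩)
        h11
        (by simp only [List.forall_mem_cons]; exact ⟨Or.inl h8, List.forall_mem_nil _⟩)
    rw [hB]
    simp only [extract_content_loopA, h1, h2, h3, h4, h5, h6, h7, h8, h9, h10, h11, Bool.false_eq_true, reduceIte]
  rw [Bool.not_eq_true] at h11
  have hB : extract_content_loopB tl none pvPrefixesB = none :=
    loopB_none tl pvPrefixesB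
      (by simp only [pvPrefixesB, List.forall_mem_cons]; exact ⟨h2, h7, h1, h5, h9, h10, h3, h4, h6, h11, h8, List.forall_mem_nil _⟩)
  rw [hB]
  simp only [extract_content_loopA, h1, h2, h3, h4, h5, h6, h7, h8, h9, h10, h11, Bool.false_eq_true, reduceIte]
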